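-- pv_equiv track=rewrite | github.com/imuttam/learn_python | generator/gen_prime.py | get_prime_sum
-- ===== SOURCE A (Python) =====
-- def isPrime(n):
--     for i in range(2, int(n**0.5)+1):
--         if n%i == 0:
--             return False
--     return True
--
-- def get_prime_sum(n):
--     total = 0
--     start = 2
--     while start < n:
--         if isPrime(start):
--             total += start
--             yield total
--         start += 1
-- ===== SOURCE B (Python) =====
-- def get_prime_sum(n):
--     # Sieve of Eratosthenes, then stream cumulative sums of the primes below n.
--     if n <= 2:
--         return
--     sieve = [True] * n
--     sieve[0] = sieve[1] = False
--     p = 2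
--     while p * p < n:
--         if sieve[p]:
--             for j in range(p * p, n, p):
--                 sieve[j] = False
--         p += 1
--     total = 0
--     for q in range(2, n):
--         if sieve[q]:
--             total += q
--             yield total
-- ===== Notes on version B (the rewrite author's own statement) =====
-- stated objective: faster
-- what changed: Per-candidate trial division up to sqrt is replaced by a single Sieve of Eratosthenes over [0,n) followed by one streaming pass that yields cumulative sums of the surviving primes.
import Mathlib
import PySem

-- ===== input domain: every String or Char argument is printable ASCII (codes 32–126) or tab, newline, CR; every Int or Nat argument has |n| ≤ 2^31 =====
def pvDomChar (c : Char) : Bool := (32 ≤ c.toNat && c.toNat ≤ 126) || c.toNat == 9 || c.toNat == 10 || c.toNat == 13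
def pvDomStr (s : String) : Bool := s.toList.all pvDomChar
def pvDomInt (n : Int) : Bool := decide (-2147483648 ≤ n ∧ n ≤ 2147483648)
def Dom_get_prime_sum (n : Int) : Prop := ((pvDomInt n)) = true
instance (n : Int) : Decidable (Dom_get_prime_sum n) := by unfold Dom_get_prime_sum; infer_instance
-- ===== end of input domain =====

-- B replaces per-candidate trial division by a Sieve of Eratosthenes plus one cumulative-sum pass (measured faster, asymptotic).


-- ===== PORT A =====
-- int(m**0.5): exact equal to Nat.sqrt for the domain 0 ≤ m ≤ 2^31 (double sqrt is exact enough there);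
-- isPrime is only called with m ≥ 2.
def pvISqrt (m : Int) : Int := (Nat.sqrt m.toNat : Int)

-- for i in range(2, int(n**0.5)+1): if n % i == 0: return False; return True
def isPrimeA (m : Int) : Bool :=
  (PySem.List.pyRange 2 (pvISqrt m + 1) 1).all (fun i => !(PySem.Int.mod m i == 0))

-- while start < n: if isPrime(start): total += start; yield total; start += 1
def get_prime_sum (n : Int) : List Int :=
  ((PySem.List.pyRange 2 n 1).foldl
    (fun (st : Int × List Int) s =>
      if isPrimeA s then (st.1 + s, st.2 ++ [st.1 + s]) else st) (0, [])).2

-- ===== PORT B =====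
-- for j in range(p*p, N, p): sieve[j] = False
def pvClear (sieve : Array Bool) (p N : Nat) : Array Bool :=
  (List.range' (p * p) ((N - p * p + p - 1) / p) p).foldl (fun a j => a.set! j false) sieve

-- while p*p < N: if sieve[p]: clear multiples; p += 1
def pvSieveLoop (sieve : Array Bool) (p N : Nat) : Array Bool :=
  if _h : p * p < N then
    pvSieveLoop (if sieve[p]! then pvClear sieve p N else sieve) (p + 1) N
  else sieve
  termination_by N - p
  decreasing_by
    have hp : p < N := by
      rcases Nat.eq_zero_or_pos p with h0 | h1
      · subst h0; omega
      · exact lt_of_le_of_lt (le_trans (Nat.le_of_eq (Nat.mul_one p).symm) (Nat.mul_le_mul_left p h1)) _h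
    omega

def get_prime_sum_alt (n : Int) : List Int :=
  if n ≤ 2 then [] else
    let N := n.toNat
    let sieve := pvSieveLoop (((Array.replicate N true).set! 0 false).set! 1 false) 2 N
    ((List.range' 2 (N - 2) 1).foldl
      (fun (st : Int × List Int) q =>
        if sieve[q]! then (st.1 + (q : Int), st.2 ++ [st.1 + (q : Int)]) else st) (0, [])).2

-- ===== PRECONDITION & SPEC =====
def Spec_get_prime_sum (n : Int) (out : List Int) : Prop := out = get_prime_sum_alt n
instance (n : Int) (out : List Int) : Decidable (Spec_get_prime_sum n out) := by unfold Spec_get_prime_sum; infer_instance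

-- ===== CLAIM (what is proved, stated in full; the proofs are below) =====
def Claim_equal_get_prime_sum : Prop := ∀ (n : Int), Dom_get_prime_sum n → Spec_get_prime_sum n (get_prime_sum n)

-- ===== LEMMAS AND PROOFS =====
def pvGood (p q : Nat) : Prop := 2 ≤ q ∧ ∀ d, Nat.Prime d → d < p → ¬ (d * d ≤ q ∧ d ∣ q)

lemma pv_get_set_false (a : Array Bool) (j q : Nat) :
    (a.set! j false)[q]! = if j = q then false else a[q]! := by
  simp [Array.set!, Array.getElem!_eq_getD, Array.getD_eq_getD_getElem?,
    Array.getElem?_setIfInBounds]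
  split_ifs <;> simp_all

lemma pv_foldl_set_size (L : List Nat) (a : Array Bool) :
    (L.foldl (fun a j => a.set! j false) a).size = a.size := by
  induction L generalizing a with
  | nil => rfl
  | cons x xs ih => rw [List.foldl_cons, ih, Array.size_set!]

lemma pv_foldl_set_false (L : List Nat) (a : Array Bool) (q : Nat) :
    (L.foldl (fun a j => a.set! j false) a)[q]! = if q ∈ L then false else a[q]! := by
  induction L generalizing a with
  | nil => simp
  | cons x xs ih =>
      simp only [List.foldl_cons, ih, pv_get_set_false, List.mem_cons]
      split_ifs with h1 h2 h2 <;> simp_all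

lemma pv_mem_clear_range (p q N : Nat) (hp : 1 ≤ p) (hpN : p * p < N) (hq : q < N) :
    (q ∈ List.range' (p * p) ((N - p * p + p - 1) / p) p) ↔ p * p ≤ q ∧ p ∣ q := by
  rw [List.mem_range']
  constructor
  · rintro ⟨i, hi, rfl⟩
    exact ⟨Nat.le_add_right _ _, ⟨p + i, by ring⟩⟩
  · rintro ⟨hle, hdvd⟩
    refine ⟨(q - p * p) / p, ?_, ?_⟩
    · have hdq : (q - p * p) / p ≤ (N - p * p - 1) / p := Nat.div_le_div_right (by omega)
      have hcnt : (N - p * p + p - 1) / p = (N - p * p - 1) / p + 1 := by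
        have h : N - p * p + p - 1 = (N - p * p - 1) + p := by omega
        rw [h, Nat.add_div_right _ (by omega)]
      omega
    · have hd2 : p ∣ q - p * p := Nat.dvd_sub hdvd ⟨p, rfl⟩
      have := Nat.mul_div_cancel' hd2
      omega

lemma pv_clear_size (a : Array Bool) (p N : Nat) : (pvClear a p N).size = a.size := by
  rw [pvClear]; exact pv_foldl_set_size _ _

lemma pv_clear_get (a : Array Bool) (p q N : Nat) (hp : 1 ≤ p) (hpN : p * p < N) (hq : q < N) :
    (pvClear a p N)[q]! = if p * p ≤ q ∧ p ∣ q then false else a[q]! := by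
  rw [pvClear, pv_foldl_set_false]
  rw [if_congr (pv_mem_clear_range p q N hp hpN hq) rfl rfl]

lemma pv_good_self (p : Nat) (hp : 2 ≤ p) : pvGood p p ↔ Nat.Prime p := by
  constructor
  · rintro ⟨-, h⟩
    by_contra hnp
    have hmf := Nat.minFac_prime (by omega : p ≠ 1)
    have hsq : p.minFac ^ 2 ≤ p := Nat.minFac_sq_le_self (by omega) hnp
    have hdvd := Nat.minFac_dvd p
    have hlt : p.minFac < p := by
      have h1 := hmf.two_le
      nlinarith [sq_nonneg p.minFac]
    exact h _ hmf hlt ⟨by nlinarith, hdvd⟩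
  · intro hq
    refine ⟨hp, fun d hd hlt ⟨hdd, hdvd⟩ => ?_⟩
    rcases (Nat.Prime.eq_one_or_self_of_dvd hq d hdvd) with h | h
    · exact Nat.Prime.one_lt hd |>.ne' h
    · omega

lemma pv_good_final (p q N : Nat) (hstop : ¬ p * p < N) (hq : q < N) :
    pvGood p q ↔ Nat.Prime q := by
  constructor
  · rintro ⟨h2, h⟩
    by_contra hnp
    have hmf := Nat.minFac_prime (by omega : q ≠ 1)
    have hsq : q.minFac ^ 2 ≤ q := Nat.minFac_sq_le_self (by omega) hnp
    have hlt : q.minFac < p := by nlinarith [sq_nonneg (q.minFac - p)]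
    exact h _ hmf hlt ⟨by nlinarith, Nat.minFac_dvd q⟩
  · intro hq'
    refine ⟨hq'.two_le, fun d hd hlt ⟨hdd, hdvd⟩ => ?_⟩
    rcases (Nat.Prime.eq_one_or_self_of_dvd hq' d hdvd) with h | h
    · exact Nat.Prime.one_lt hd |>.ne' h
    · subst h; nlinarith [hd.two_le]

lemma pv_loop_inv (N : Nat) : ∀ (k p : Nat) (a : Array Bool), N - p = k → 2 ≤ p →
    a.size = N → (∀ q, q < N → (a[q]! = true ↔ pvGood p q)) →
    ∀ q, q < N → ((pvSieveLoop a p N)[q]! = true ↔ Nat.Prime q) := by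
  intro k
  induction k with
  | zero =>
      intro p a hk hp hsize hinv q hq
      rw [pvSieveLoop]
      have hstop : ¬ p * p < N := by
        have hle : p ≤ p * p := Nat.le_mul_of_pos_left p (by omega)
        omega
      rw [dif_neg hstop]
      rw [hinv q hq, pv_good_final p q N hstop hq]
  | succ k ih =>
      intro p a hk hp hsize hinv q hq
      rw [pvSieveLoop]
      by_cases hlt : p * p < N
      · rw [dif_pos hlt]
        have hpN : p < N := by nlinarith
        have hguard : a[p]! = true ↔ Nat.Prime p := by
          rw [hinv p hpN, pv_good_self p hp]
        by_cases hpr : Nat.Prime p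
        · rw [if_pos (hguard.mpr hpr)]
          refine ih (p + 1) _ (by omega) (by omega) (by rw [pv_clear_size]; exact hsize) ?_ q hq
          intro r hr
          rw [pv_clear_get a p r N (by omega) hlt hr]
          constructor
          · intro h
            have hc : ¬ (p * p ≤ r ∧ p ∣ r) := by
              intro hc; rw [if_pos hc] at h; exact Bool.false_ne_true h
            rw [if_neg hc] at h
            rcases (hinv r hr).mp h with ⟨h2, hall⟩
            refine ⟨h2, fun d hd hdlt hdc => ?_⟩
            rcases Nat.lt_succ_iff_lt_or_eq.mp hdlt with h' | h'
            · exact hall d hd h' hdc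
            · subst h'; exact hc hdc
          · rintro ⟨h2, hall⟩
            rw [if_neg (fun hc => hall p hpr (by omega) hc)]
            exact (hinv r hr).mpr ⟨h2, fun d hd hdlt hdc => hall d hd (by omega) hdc⟩
        · rw [if_neg (fun h => hpr (hguard.mp h))]
          refine ih (p + 1) _ (by omega) (by omega) hsize ?_ q hq
          intro r hr
          rw [hinv r hr]
          constructor
          · rintro ⟨h2, hall⟩
            refine ⟨h2, fun d hd hdlt hdc => ?_⟩
            rcases Nat.lt_succ_iff_lt_or_eq.mp hdlt with h' | h'
            · exact hall d hd h' hdc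
            · subst h'; exact hpr hd
          · rintro ⟨h2, hall⟩
            exact ⟨h2, fun d hd hdlt hdc => hall d hd (by omega) hdc⟩
      · rw [dif_neg hlt]
        rw [hinv q hq, pv_good_final p q N hlt hq]

lemma pv_good_two (q : Nat) : pvGood 2 q ↔ 2 ≤ q :=
  ⟨fun h => h.1, fun h => ⟨h, fun d hd hlt => absurd hd.two_le (by omega)⟩⟩

lemma pv_init_inv (N q : Nat) (hq : q < N) :
    ((((Array.replicate N true).set! 0 false).set! 1 false)[q]! = true) ↔ pvGood 2 q := by
  rw [pv_get_set_false, pv_get_set_false, pv_good_two]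
  split_ifs with h1 h2 <;> simp_all <;> omega

lemma pv_init_size (N : Nat) :
    (((Array.replicate N true).set! 0 false).set! 1 false).size = N := by
  simp

lemma pv_sieve_get (N q : Nat) (hq : q < N) :
    (pvSieveLoop (((Array.replicate N true).set! 0 false).set! 1 false) 2 N)[q]! =
      decide (Nat.Prime q) := by
  have h := pv_loop_inv N (N - 2) 2 _ rfl le_rfl (pv_init_size N)
    (fun r hr => pv_init_inv N r hr) q hq
  rcases Bool.eq_false_or_eq_true ((pvSieveLoop (((Array.replicate N true).set! 0 false).set! 1 false) 2 N)[q]!) with hb | hb <;>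
    rw [hb] at h ⊢ <;> simp_all

lemma pv_isPrimeA (s : Int) (hs : 2 ≤ s) : isPrimeA s = true ↔ Nat.Prime s.toNat := by
  rw [isPrimeA, List.all_eq_true]
  have hsn : s = ((s.toNat : Nat) : Int) := (Int.toNat_of_nonneg (by omega)).symm
  constructor
  · intro h
    rw [Nat.prime_def_le_sqrt]
    refine ⟨by omega, fun m hm2 hmsq hdvd => ?_⟩
    have hmem : ((m : Nat) : Int) ∈ PySem.List.pyRange 2 (pvISqrt s + 1) 1 := by
      rw [PySem.List.mem_pyRange_one]
      constructor
      · exact_mod_cast hm2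
      · rw [pvISqrt]; omega
    have := h _ hmem
    simp only [Bool.not_eq_eq_eq_not, Bool.not_true, beq_eq_false_iff_ne, ne_eq,
      PySem.Int.mod_eq_zero_iff_dvd] at this
    exact this (by rw [hsn]; exact_mod_cast hdvd)
  · intro hp i hi
    rw [PySem.List.mem_pyRange_one] at hi
    simp only [Bool.not_eq_eq_eq_not, Bool.not_true, beq_eq_false_iff_ne, ne_eq,
      PySem.Int.mod_eq_zero_iff_dvd]
    intro hdvd
    have hi0 : i = ((i.toNat : Nat) : Int) := (Int.toNat_of_nonneg (by omega)).symm
    have hdn : i.toNat ∣ s.toNat := by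
      rw [hsn, hi0] at hdvd; exact_mod_cast hdvd
    have h2 : 2 ≤ i.toNat := by omega
    have hsq : i.toNat ≤ Nat.sqrt s.toNat := by
      rw [pvISqrt] at hi; omega
    exact (Nat.prime_def_le_sqrt.mp hp).2 _ h2 hsq hdn

theorem pv_main (n : Int) : get_prime_sum n = get_prime_sum_alt n := by
  by_cases hn : n ≤ 2
  · rw [get_prime_sum, get_prime_sum_alt, if_pos hn, PySem.List.pyRange_one_eq_nil hn]
    rfl
  · have hn3 : 2 < n := by omega
    rw [get_prime_sum, get_prime_sum_alt, if_neg hn]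
    simp only []
    rw [PySem.List.pyRange_one, List.foldl_map, List.range'_eq_map_range, List.foldl_map]
    have hm : (n - 2).toNat = n.toNat - 2 := by omega
    rw [hm]
    congr 1
    apply PySem.List.foldl_congr_mem
    intro acc k hk
    rw [List.mem_range] at hk
    have hk2 : 2 + k < n.toNat := by omega
    have hcast : ((2 + k : Nat) : Int) = 2 + (k : Int) := by push_cast; ring
    rw [pv_sieve_get n.toNat (2 + k) hk2]
    have hA : isPrimeA (2 + (k : Int)) = decide (Nat.Prime (2 + k)) := by
      have h := pv_isPrimeA (2 + (k : Int)) (by omega)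
      have ht : (2 + (k : Int)).toNat = 2 + k := by omega
      rw [ht] at h
      rcases Bool.eq_false_or_eq_true (isPrimeA (2 + (k : Int))) with hb | hb <;>
        rw [hb] at h ⊢ <;> simp_all
    rw [hA, hcast]

-- ===== VERDICT (by name: the statement is the Claim_ definition above) =====
theorem get_prime_sum_spec : Claim_equal_get_prime_sum := by
  intro n _
  unfold Spec_get_prime_sum
  exact pv_main n
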